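-- pv_equiv track=rewrite | github.com/shiveshsky/datastructures | stacks/max_rect_histogram.py | smallest_right
-- ===== SOURCE A (Python) =====
-- def smallest_right(A):
--     stk = []
--     # ans = [i for i in range(0, len(A))]
--     ans = [len(A)-1]*len(A)
--     for i in range(0, len(A)):
--         if len(stk) == 0:
--             stk.append(i)
--         else:
--             if A[stk[-1]] <= A[i]:
--                 stk.append(i)
--             else:
--                 while len(stk) > 0 and A[stk[-1]] > A[i]:
--                     ind = stk.pop()
--                     ans[ind] = i-1
--                 stk.append(i)
--     return ans
-- ===== SOURCE B (Python) =====
-- def smallest_right(A):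
--     n = len(A)
--     ans = []
--     for i in range(n):
--         r = n - 1
--         for j in range(i + 1, n):
--             if A[j] < A[i]:
--                 r = j - 1
--                 break
--         ans.append(r)
--     return ans
-- ===== Notes on version B (the rewrite author's own statement) =====
-- stated objective: simpler
-- what changed: Replaced the monotonic-stack state machine with a direct brute-force scan: for each index, scan rightward for the first strictly smaller element and return its predecessor index, defaulting to len(A)-1.
import Mathlib
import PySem

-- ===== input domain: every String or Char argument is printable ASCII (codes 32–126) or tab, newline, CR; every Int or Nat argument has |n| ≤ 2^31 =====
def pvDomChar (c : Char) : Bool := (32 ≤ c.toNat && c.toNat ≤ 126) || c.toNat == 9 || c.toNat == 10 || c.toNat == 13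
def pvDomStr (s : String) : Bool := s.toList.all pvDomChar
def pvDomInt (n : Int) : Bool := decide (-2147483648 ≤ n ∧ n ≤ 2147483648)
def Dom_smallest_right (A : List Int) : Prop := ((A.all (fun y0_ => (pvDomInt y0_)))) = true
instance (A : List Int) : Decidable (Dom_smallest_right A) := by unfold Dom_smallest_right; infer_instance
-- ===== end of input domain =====

-- B replaces A's monotonic-stack state machine by a direct per-index rightward scan
-- for the first strictly smaller element (objective: simpler; not faster).

-- ===== PORT A =====
-- the inner `while` loop of A: pop while the top of the stack holds a value > A[i],
-- recording ans[ind] = i-1 for each popped index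
def popAll (A : List Int) (i : Nat) : List Nat → List Int → List Nat × List Int
  | [], ans => ([], ans)
  | t :: rest, ans =>
    if A.getD t 0 > A.getD i 0 then popAll A i rest (ans.set t ((i : Int) - 1))
    else (t :: rest, ans)

-- one iteration of A's `for i in range(0, len(A))` body (stack kept top-first)
def stepA (A : List Int) (st : List Nat × List Int) (i : Nat) : List Nat × List Int :=
  if st.1.isEmpty then (i :: st.1, st.2)
  else if A.getD (st.1.headD 0) 0 ≤ A.getD i 0 then (i :: st.1, st.2)
  else
    let p := popAll A i st.1 st.2
    (i :: p.1, p.2)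

def smallest_right (A : List Int) : List Int :=
  ((List.range A.length).foldl (stepA A)
    ([], List.replicate A.length ((A.length : Int) - 1))).2

-- ===== PORT B =====
-- B's inner loop: scan j = start, start+1, … for the first j with A[j] < x;
-- return j-1 on the first hit, len(A)-1 if the scan runs off the end
def findSm (A : List Int) (x : Int) (j : Nat) : Int :=
  if h : j < A.length then
    if A.getD j 0 < x then (j : Int) - 1 else findSm A x (j + 1)
  else (A.length : Int) - 1
termination_by A.length - j

def smallest_right_alt (A : List Int) : List Int :=
  (List.range A.length).map (fun i => findSm A (A.getD i 0) (i + 1))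

-- ===== PRECONDITION & SPEC =====
def Spec_smallest_right (A : List Int) (out : List Int) : Prop := out = smallest_right_alt A
instance (A : List Int) (out : List Int) : Decidable (Spec_smallest_right A out) := by unfold Spec_smallest_right; infer_instance

-- ===== CLAIM (what is proved, stated in full; the proofs are below) =====
def Claim_equal_smallest_right : Prop := ∀ (A : List Int), Dom_smallest_right A → Spec_smallest_right A (smallest_right A)

-- ===== LEMMAS AND PROOFS =====

-- index j is "alive" after the first i iterations of A's loop: no strictly smaller
-- element occurs in (j, i); exactly the indices still on A's stack (for j < i)
def aliveb (A : List Int) (i j : Nat) : Bool :=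
  decide (∀ k, k < i → j < k → A.getD j 0 ≤ A.getD k 0)

def stkSpec (A : List Int) (i : Nat) : List Nat :=
  ((List.range i).filter (fun j => aliveb A i j)).reverse

def ansSpec (A : List Int) (i : Nat) : List Int :=
  (List.range A.length).map
    (fun j => if aliveb A i j then (A.length : Int) - 1 else findSm A (A.getD j 0) (j + 1))

theorem aliveb_of_le (A : List Int) {i j : Nat} (h : i ≤ j + 1) : aliveb A i j = true := by
  simp only [aliveb, decide_eq_true_eq]
  intro k hk hjk; omega

theorem aliveb_succ (A : List Int) {i j : Nat} (h : j < i) :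
    aliveb A (i + 1) j = (aliveb A i j && decide (A.getD j 0 ≤ A.getD i 0)) := by
  rw [Bool.eq_iff_iff]
  simp only [aliveb, Bool.and_eq_true, decide_eq_true_eq]
  constructor
  · intro hall
    exact ⟨fun k hk hjk => hall k (by omega) hjk, hall i (by omega) h⟩
  · rintro ⟨hall, hi⟩ k hk hjk
    rcases Nat.lt_succ_iff_lt_or_eq.mp hk with h' | rfl
    · exact hall k h' hjk
    · exact hi

theorem aliveb_prop (A : List Int) {i j : Nat} (h : aliveb A i j = true) :
    ∀ k, k < i → j < k → A.getD j 0 ≤ A.getD k 0 := by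
  simpa [aliveb, decide_eq_true_eq] using h

theorem findSm_hit (A : List Int) (x : Int) {j i : Nat} (hji : j ≤ i) (hi : i < A.length)
    (hmid : ∀ k, j ≤ k → k < i → x ≤ A.getD k 0) (hhit : A.getD i 0 < x) :
    findSm A x j = (i : Int) - 1 := by
  induction hd : i - j generalizing j with
  | zero =>
    have : j = i := by omega
    subst this
    rw [findSm, dif_pos hi, if_pos hhit]
  | succ m ih =>
    have hj : j < A.length := by omega
    have hne : j < i := by omega
    have hnot : ¬ A.getD j 0 < x := not_lt.mpr (hmid j le_rfl hne)
    rw [findSm, dif_pos hj, if_neg hnot]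
    exact ih (by omega) (fun k hk hki => hmid k (by omega) hki) (by omega)

theorem findSm_none (A : List Int) (x : Int) {j : Nat}
    (h : ∀ k, j ≤ k → k < A.length → x ≤ A.getD k 0) :
    findSm A x j = (A.length : Int) - 1 := by
  induction hd : A.length - j generalizing j with
  | zero =>
    rw [findSm]; simp [show ¬ j < A.length by omega]
  | succ m ih =>
    have hj : j < A.length := by omega
    have hnot : ¬ A.getD j 0 < x := not_lt.mpr (h j le_rfl hj)
    rw [findSm, dif_pos hj, if_neg hnot]
    exact ih (fun k hk hkl => h k (by omega) hkl) (by omega)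

theorem stepA_eq_pop (A : List Int) (st : List Nat × List Int) (i : Nat) :
    stepA A st i = ((i :: (popAll A i st.1 st.2).1, (popAll A i st.1 st.2).2)) := by
  obtain ⟨stk, ans⟩ := st
  cases stk with
  | nil => simp [stepA, popAll]
  | cons t rest =>
    by_cases h : A.getD t 0 ≤ A.getD i 0
    · simp only [stepA, List.isEmpty_cons, Bool.false_eq_true, if_false, List.headD_cons]
      rw [if_pos h]
      conv_rhs => rw [popAll]
      rw [if_neg (not_lt.mpr h)]
    · simp only [stepA, List.isEmpty_cons, Bool.false_eq_true, if_false, List.headD_cons]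
      rw [if_neg h]

theorem popAll_spec (A : List Int) (i : Nat) (L : List Nat) (ans : List Int)
    (hp : L.Pairwise (fun a b => A.getD b 0 ≤ A.getD a 0)) :
    popAll A i L ans =
      (L.filter (fun t => !decide (A.getD i 0 < A.getD t 0)),
       (L.filter (fun t => decide (A.getD i 0 < A.getD t 0))).foldl
         (fun a t => a.set t ((i : Int) - 1)) ans) := by
  induction L generalizing ans with
  | nil => simp [popAll]
  | cons t rest ih =>
    rcases List.pairwise_cons.mp hp with ⟨hhead, htail⟩
    by_cases h : A.getD i 0 < A.getD t 0
    · conv_lhs => rw [popAll]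
      rw [if_pos (by exact h), ih _ htail, List.filter_cons, List.filter_cons]
      rw [if_neg (by simpa using h), if_pos (by simpa using h), List.foldl_cons]
    · have hall : ∀ b ∈ (t :: rest), ¬ A.getD i 0 < A.getD b 0 := by
        intro b hb
        rcases List.mem_cons.mp hb with rfl | hb'
        · exact h
        · exact not_lt.mpr (le_trans (hhead b hb') (not_lt.mp h))
      have h1 : (t :: rest).filter (fun s => !decide (A.getD i 0 < A.getD s 0)) = t :: rest :=
        List.filter_eq_self.mpr (fun b hb => by simpa using hall b hb)
      have h2 : (t :: rest).filter (fun s => decide (A.getD i 0 < A.getD s 0)) = [] :=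
        List.filter_eq_nil_iff.mpr (fun b hb => by simpa using hall b hb)
      rw [h1, h2, List.foldl_nil]
      conv_lhs => rw [popAll]
      rw [if_neg (by exact h)]

theorem stkSpec_pairwise (A : List Int) (i : Nat) :
    (stkSpec A i).Pairwise (fun a b => A.getD b 0 ≤ A.getD a 0) := by
  unfold stkSpec
  rw [List.pairwise_reverse]
  have h0 : (List.range i).Pairwise (· < ·) := List.pairwise_lt_range
  have h1 := h0.filter (fun j => aliveb A i j)
  refine h1.imp_of_mem ?_
  intro a b ha hb hab
  rcases List.mem_filter.mp ha with ⟨haR, haA⟩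
  rcases List.mem_filter.mp hb with ⟨hbR, _⟩
  exact aliveb_prop A haA b (List.mem_range.mp hbR) hab

theorem foldl_set_length (ts : List Nat) (v : Int) (ans : List Int) :
    (ts.foldl (fun a t => a.set t v) ans).length = ans.length := by
  induction ts generalizing ans with
  | nil => rfl
  | cons t ts ih => simp [List.foldl_cons, ih, List.length_set]

theorem foldl_set_getD (ts : List Nat) (v : Int) (ans : List Int) (j : Nat) :
    (ts.foldl (fun a t => a.set t v) ans).getD j 0 =
      if j ∈ ts ∧ j < ans.length then v else ans.getD j 0 := by
  induction ts generalizing ans with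
  | nil => simp
  | cons t ts ih =>
    simp only [List.foldl_cons]
    rw [ih]
    have hset : (ans.set t v).getD j 0 =
        if t = j ∧ j < ans.length then v else ans.getD j 0 := by
      simp only [List.getD, List.getElem?_set]
      by_cases hjl : j < ans.length
      · by_cases htj : t = j
        · simp [hjl, htj]
        · simp [htj, hjl]
      · by_cases htj : t = j
        · subst htj
          simp [show ¬ t < ans.length from by omega]
        · simp [htj, hjl]
    rw [hset]
    simp only [List.length_set, List.mem_cons]
    by_cases h1 : j ∈ ts <;> by_cases h2 : t = j <;> by_cases h3 : j < ans.length <;>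
      (simp [h1, h2, h3]; try (intro hc; exact absurd hc.symm h2))

theorem invariant_step (A : List Int) (i : Nat) (hi : i < A.length) :
    stepA A (stkSpec A i, ansSpec A i) i = (stkSpec A (i + 1), ansSpec A (i + 1)) := by
  rw [stepA_eq_pop, popAll_spec A i _ _ (stkSpec_pairwise A i)]
  refine Prod.ext ?_ ?_
  · -- stack component
    show i :: (stkSpec A i).filter (fun t => !decide (A.getD i 0 < A.getD t 0)) = stkSpec A (i+1)
    unfold stkSpec
    rw [List.range_succ, List.filter_append]
    have hii : aliveb A (i+1) i = true := aliveb_of_le A (by omega)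
    simp only [List.filter_cons, hii, List.filter_nil, if_true]
    rw [List.reverse_append]
    simp only [List.reverse_cons, List.reverse_nil, List.nil_append, List.cons_append,
      List.nil_append]
    congr 1
    rw [List.filter_reverse, List.filter_filter]
    congr 1
    apply List.filter_congr
    intro j hj
    have hjlt : j < i := List.mem_range.mp hj
    rw [aliveb_succ A hjlt]
    by_cases ha : aliveb A i j = true
    · simp only [ha, Bool.and_true, Bool.true_and]
      rw [Bool.eq_iff_iff]
      simp only [Bool.not_eq_true', decide_eq_false_iff_not, decide_eq_true_eq]
      exact not_lt
    · simp [ha]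
  · -- answer component
    show ((stkSpec A i).filter (fun t => decide (A.getD i 0 < A.getD t 0))).foldl
        (fun a t => a.set t ((i:Int)-1)) (ansSpec A i) = ansSpec A (i+1)
    set ts := (stkSpec A i).filter (fun t => decide (A.getD i 0 < A.getD t 0)) with hts
    have hmem : ∀ j, j ∈ ts ↔ (j < i ∧ aliveb A i j = true ∧ A.getD i 0 < A.getD j 0) := by
      intro j
      simp only [hts, stkSpec, List.mem_filter, List.mem_reverse, List.mem_range,
        decide_eq_true_eq]
      tauto
    have hlen : (ansSpec A i).length = A.length := by simp [ansSpec]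
    have hlen1 : (ansSpec A (i+1)).length = A.length := by simp [ansSpec]
    apply List.ext_getElem
    · rw [foldl_set_length, hlen, hlen1]
    · intro j hj1 hj2
      have hjn : j < A.length := by rw [foldl_set_length, hlen] at hj1; exact hj1
      rw [← List.getD_eq_getElem _ 0 hj1, ← List.getD_eq_getElem _ 0 hj2]
      rw [foldl_set_getD]
      have hRHS : (ansSpec A (i+1)).getD j 0 =
          (if aliveb A (i+1) j then (A.length : Int) - 1 else findSm A (A.getD j 0) (j + 1)) := by
        rw [List.getD_eq_getElem _ 0 (by simpa [hlen1] using hjn)]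
        simp [ansSpec]
      have hLHSb : (ansSpec A i).getD j 0 =
          (if aliveb A i j then (A.length : Int) - 1 else findSm A (A.getD j 0) (j + 1)) := by
        rw [List.getD_eq_getElem _ 0 (by simpa [hlen] using hjn)]
        simp [ansSpec]
      rw [hRHS, hLHSb, hlen]
      by_cases hin : j ∈ ts
      · rcases (hmem j).mp hin with ⟨hji, hal, hlt⟩
        have hnew : aliveb A (i+1) j = false := by
          rw [aliveb_succ A hji, hal, Bool.true_and]
          simpa using not_le.mpr hlt
        rw [if_pos ⟨hin, hjn⟩, hnew]
        simp only [if_false, Bool.false_eq_true]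
        rw [findSm_hit A (A.getD j 0) (by omega) hi
          (fun k hk hki => aliveb_prop A hal k hki (by omega)) hlt]
      · rw [if_neg (fun hc => hin hc.1)]
        rcases Nat.lt_trichotomy j i with hji | heq | hij
        · by_cases hal : aliveb A i j = true
          · have hle : A.getD j 0 ≤ A.getD i 0 := by
              by_contra hc
              exact hin ((hmem j).mpr ⟨hji, hal, lt_of_not_ge hc⟩)
            rw [aliveb_succ A hji, hal, Bool.true_and, decide_eq_true hle]
          · rw [aliveb_succ A hji, Bool.eq_false_iff.mpr hal, Bool.false_and]
        · rw [aliveb_of_le A (by omega), aliveb_of_le A (by omega)]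
        · rw [aliveb_of_le A (by omega), aliveb_of_le A (by omega)]

theorem invariant_all (A : List Int) (i : Nat) (hi : i ≤ A.length) :
    (List.range i).foldl (stepA A) ([], List.replicate A.length ((A.length : Int) - 1))
      = (stkSpec A i, ansSpec A i) := by
  induction i with
  | zero =>
    simp only [List.range_zero, List.foldl_nil]
    refine Prod.ext ?_ ?_
    · simp [stkSpec]
    · unfold ansSpec
      apply List.ext_getElem
      · simp
      · intro j hj1 hj2
        have : aliveb A 0 j = true := aliveb_of_le A (by omega)
        simp [this]
  | succ m ih =>
    rw [List.range_succ, List.foldl_append, ih (by omega), List.foldl_cons, List.foldl_nil]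
    exact invariant_step A m (by omega)

-- ===== VERDICT (by name: the statement is the Claim_ definition above) =====
theorem smallest_right_spec : Claim_equal_smallest_right := by
  intro A _
  show smallest_right A = smallest_right_alt A
  unfold smallest_right
  rw [invariant_all A A.length le_rfl]
  unfold ansSpec smallest_right_alt
  apply List.map_congr_left
  intro j hj
  have hjn : j < A.length := List.mem_range.mp hj
  by_cases hal : aliveb A A.length j = true
  · rw [if_pos hal, findSm_none A (A.getD j 0)
      (fun k hk hkl => aliveb_prop A hal k hkl (by omega))]
  · simp [Bool.eq_false_iff.mpr hal]
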